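-- pv_equiv track=rewrite | github.com/gimgyuwon/Algorithm | 백준/Silver/2161. 카드1/카드1.py | solution
-- ===== SOURCE A (Python) =====
-- from collections import deque
--
-- def solution(input_data):
--     ans = []
--     dq = deque(list(range(1, input_data+1)))
--     for _ in range(len(dq)):
--         ans.append(dq.popleft())
--         if len(ans) != input_data:
--             tmp = dq.popleft()
--             dq.append(tmp)
--
--     return str(ans)[1:-1].replace(",", "")
-- ===== SOURCE B (Python) =====
-- def solution(input_data):
--     ans = []
--     cur = list(range(1, input_data + 1))
--     discard = True
--     while cur:
--         nxt = []
--         for x in cur: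
--             if discard:
--                 ans.append(x)
--             else:
--                 nxt.append(x)
--             discard = not discard
--         cur = nxt
--     return ' '.join(map(str, ans))
-- ===== Notes on version B (the rewrite author's own statement) =====
-- stated objective: alternative
-- what changed: Replaces A's deque popleft/append rotation (and its str(list)[1:-1].replace formatting) by repeated left-to-right elimination passes over a shrinking list with a persistent discard/keep parity flag, joining the result with ' '.join.
import Mathlib
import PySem

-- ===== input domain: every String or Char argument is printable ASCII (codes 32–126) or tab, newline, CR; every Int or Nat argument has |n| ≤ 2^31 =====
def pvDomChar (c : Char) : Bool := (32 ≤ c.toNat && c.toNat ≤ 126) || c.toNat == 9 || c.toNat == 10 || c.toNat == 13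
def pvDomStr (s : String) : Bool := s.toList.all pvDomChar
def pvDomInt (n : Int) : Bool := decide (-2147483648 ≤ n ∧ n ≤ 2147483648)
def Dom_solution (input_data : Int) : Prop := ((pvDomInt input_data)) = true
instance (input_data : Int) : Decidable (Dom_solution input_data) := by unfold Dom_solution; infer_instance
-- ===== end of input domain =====

-- B replaces A's deque rotation by repeated left-to-right elimination passes over a
-- shrinking list with a persistent discard/keep parity flag (objective: alternative).

-- ===== PORT A =====
-- one iteration of A's for-loop over state (ans, dq); the [] branches are unreachable
-- (the deque always holds enough cards when Python pops), Python never raises here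
def solutionStep (input_data : Int) (st : List Int × List Int) (_i : Nat) :
    List Int × List Int :=
  match st with
  | (ans, dq) =>
    match dq with
    | [] => (ans, [])
    | x :: rest =>
      let ans' := ans ++ [x]                       -- ans.append(dq.popleft())
      if (ans'.length : Int) ≠ input_data then     -- if len(ans) != input_data:
        match rest with
        | [] => (ans', [])
        | y :: t => (ans', t ++ [y])               -- tmp = dq.popleft(); dq.append(tmp)
      else (ans', rest)

def solution (input_data : Int) : String :=
  let dq := PySem.List.pyRange 1 (input_data + 1) 1          -- deque(list(range(1, n+1)))
  let res := (List.range dq.length).foldl (solutionStep input_data) ([], dq)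
  let ans := res.1
  -- str(ans) for a list of ints, ported by hand: '[' ++ ", ".join(map(str, ans)) ++ ']'
  let s : List Char := '[' :: (PySem.Chars.join (", ".toList) (ans.map PySem.Int.toChars) ++ [']'])
  -- [1:-1] then .replace(",", "")
  String.ofList (PySem.Chars.replace (PySem.List.slice s (some 1) (some (-1))) (",".toList) ("".toList))

-- ===== PORT B =====
-- one step of B's inner for-loop over state (ans, nxt, discard)
def passStep (st : List Int × List Int × Bool) (x : Int) : List Int × List Int × Bool :=
  match st with
  | (ans, nxt, d) => if d then (ans ++ [x], nxt, !d) else (ans, nxt ++ [x], !d)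

-- termination measure of B's while-loop: one full pass over a nonempty list strictly
-- shrinks 2*(elements still in play) + (1 if the flag is 'keep')
theorem passStep_measure : ∀ (cur ans nxt : List Int) (d : Bool), cur ≠ [] →
    2 * (cur.foldl passStep (ans, nxt, d)).2.1.length
      + (if (cur.foldl passStep (ans, nxt, d)).2.2 then 0 else 1)
    < 2 * (cur.length + nxt.length) + (if d then 0 else 1) := by
  intro cur
  induction cur with
  | nil => intro _ _ _ h; exact absurd rfl h
  | cons x t ih =>
    intro ans nxt d _
    cases t with
    | nil =>
      cases d
      · simp [passStep]
      · simp [passStep]; omega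
    | cons y t' =>
      cases d
      · have := ih ans (nxt ++ [x]) true (by simp)
        simp [passStep] at this ⊢; omega
      · have := ih (ans ++ [x]) nxt false (by simp)
        simp [passStep] at this ⊢; omega

-- one full pass of B's while-loop (the inner for-loop as a foldl)
def runPass (cur ans : List Int) (d : Bool) : List Int × List Int × Bool :=
  cur.foldl passStep (ans, [], d)

-- B's while-loop: run one pass, recurse on the kept list
def loopB (cur : List Int) (ans : List Int) (d : Bool) : List Int :=
  if _h : cur = [] then ans
  else
    let r := runPass cur ans d
    loopB r.2.1 r.1 r.2.2
termination_by 2 * cur.length + (if d then 0 else 1)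
decreasing_by
  have := passStep_measure cur ans [] d _h
  simpa [runPass] using this

def solution_alt (input_data : Int) : String :=
  let ans := loopB (PySem.List.pyRange 1 (input_data + 1) 1) [] true
  String.ofList (PySem.Chars.join (" ".toList) (ans.map PySem.Int.toChars))  -- ' '.join(map(str, ans))

-- ===== PRECONDITION & SPEC =====
def Spec_solution (input_data : Int) (out : String) : Prop := out = solution_alt input_data
instance (input_data : Int) (out : String) : Decidable (Spec_solution input_data out) := by unfold Spec_solution; infer_instance

-- ===== CLAIM (what is proved, stated in full; the proofs are below) =====
def Claim_equal_solution : Prop := ∀ (input_data : Int), Dom_solution input_data → Spec_solution input_data (solution input_data)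

-- ===== LEMMAS AND PROOFS =====

-- the Josephus "discard one, move one to the back" sequence, as a recursion on the circle
def rot1 : List Int → List Int
  | [] => []
  | y :: t => t ++ [y]

theorem rot1_length (l : List Int) : (rot1 l).length = l.length := by
  cases l <;> simp [rot1]

def J : List Int → List Int
  | [] => []
  | x :: rest => x :: J (rot1 rest)
termination_by l => l.length
decreasing_by simp [rot1_length]

-- ---- A's loop produces J ----
theorem foldA (input_data : Int) : ∀ (k : Nat) (dq ans : List Int) (l : List Nat),
    dq.length = k → l.length = dq.length → (ans.length : Int) + dq.length = input_data →
    l.foldl (solutionStep input_data) (ans, dq) = (ans ++ J dq, []) := by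
  intro k
  induction k with
  | zero =>
    intro dq ans l hk hl _
    have hdq : dq = [] := List.length_eq_zero_iff.mp hk
    subst hdq
    have : l = [] := List.length_eq_zero_iff.mp hl
    subst this
    simp [J]
  | succ k ih =>
    intro dq ans l hk hl hinv
    match dq, l with
    | x :: rest, i :: l' =>
      rw [List.foldl_cons]
      have hstep : solutionStep input_data (ans, x :: rest) i =
          if (ans.length + 1 : Int) ≠ input_data then
            (match rest with
             | [] => (ans ++ [x], ([] : List Int))
             | y :: t => (ans ++ [x], t ++ [y]))
          else (ans ++ [x], rest) := by
        simp [solutionStep]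
      cases rest with
      | nil =>
        have hinv' : (ans.length : Int) + 1 = input_data := by
          simp only [List.length_cons, List.length_nil] at hinv; push_cast at hinv ⊢; omega
        have hne : ¬ ((ans.length + 1 : Int) ≠ input_data) := by omega
        rw [hstep, if_neg hne]
        have hl' : l' = [] := by
          have : l'.length = 0 := by simpa using hl
          exact List.length_eq_zero_iff.mp this
        subst hl'
        simp [J, rot1]
      | cons y t =>
        have hinv' : (ans.length : Int) + (t.length + 2) = input_data := by
          simp only [List.length_cons] at hinv; push_cast at hinv ⊢; omega
        have hne : (ans.length + 1 : Int) ≠ input_data := by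
          have : (0:Int) ≤ (t.length : Int) := by positivity
          omega
        rw [hstep, if_pos hne]
        have hrec := ih (t ++ [y]) (ans ++ [x]) l'
          (by simp at hk ⊢; omega) (by simp at hl hk ⊢; omega)
          (by simp only [List.length_append, List.length_cons, List.length_nil]
              push_cast at hinv' ⊢; omega)
        rw [hrec]
        have : J (x :: y :: t) = x :: J (t ++ [y]) := by
          rw [J]; rfl
        simp [this]

-- ---- B's loop produces J ----
-- the mid-pass continuation of loopB
def midB (cur nxt ans : List Int) (d : Bool) : List Int :=
  let r := cur.foldl passStep (ans, nxt, d)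
  loopB r.2.1 r.1 r.2.2

theorem loopB_nil (ans : List Int) (d : Bool) : loopB [] ans d = ans := by
  rw [loopB.eq_def]; simp

theorem loopB_cons (z : Int) (zs ans : List Int) (d : Bool) :
    loopB (z :: zs) ans d = midB (z :: zs) [] ans d := by
  rw [loopB.eq_def]; simp [midB, runPass]

theorem midB_eq_J : ∀ (μ : Nat) (cur nxt ans : List Int) (d : Bool),
    2 * (cur.length + nxt.length) + (if d then 0 else 1) ≤ μ →
    midB cur nxt ans d = ans ++ (if d then J (cur ++ nxt) else J (rot1 (cur ++ nxt))) := by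
  intro μ
  induction μ with
  | zero =>
    intro cur nxt ans d h
    match cur, nxt, d with
    | [], [], true => simp [midB, loopB_nil, J]
    | [], [], false => simp at h
    | _ :: _, _, _ => exfalso; simp at h
    | [], _ :: _, _ => exfalso; simp at h
  | succ μ ih =>
    intro cur nxt ans d h
    match cur, nxt with
    | z :: zs, nxt =>
      cases d with
      | true =>
        have h1 : midB (z :: zs) nxt ans true = midB zs nxt (ans ++ [z]) false := by
          simp [midB, passStep]
        rw [h1, ih zs nxt (ans ++ [z]) false (by simp at h ⊢; omega)]
        have : J (z :: (zs ++ nxt)) = z :: J (rot1 (zs ++ nxt)) := by rw [J]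
        simp [this]
      | false =>
        have h1 : midB (z :: zs) nxt ans false = midB zs (nxt ++ [z]) ans true := by
          simp [midB, passStep]
        rw [h1, ih zs (nxt ++ [z]) ans true (by simp at h ⊢; omega)]
        simp [rot1]
    | [], [] =>
      cases d <;> simp [midB, loopB_nil, J, rot1]
    | [], z :: zs =>
      have h0 : midB ([] : List Int) (z :: zs) ans d = loopB (z :: zs) ans d := by
        simp [midB]
      rw [h0, loopB_cons]
      cases d with
      | true =>
        have h2 : midB (z :: zs) [] ans true = midB zs [] (ans ++ [z]) false := by
          simp [midB, passStep]
        rw [h2, ih zs [] (ans ++ [z]) false (by simp at h ⊢; omega)]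
        have : J (z :: zs) = z :: J (rot1 zs) := by rw [J]
        simp [this]
      | false =>
        have h2 : midB (z :: zs) [] ans false = midB zs [z] ans true := by
          simp [midB, passStep]
        rw [h2, ih zs [z] ans true (by simp at h ⊢; omega)]
        simp [rot1]

theorem loopB_eq_J (cur : List Int) : loopB cur [] true = J cur := by
  cases cur with
  | nil => simp [loopB_nil, J]
  | cons z zs =>
    rw [loopB_cons, midB_eq_J (2 * ((z :: zs).length + 0) + 0) (z :: zs) [] [] true (by simp)]
    simp

-- ---- formatting: A's str(list)[1:-1].replace(",","") equals B's ' '.join ----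

theorem slice_brackets (ys : List Char) :
    PySem.List.slice ('[' :: (ys ++ [']'])) (some 1) (some (-1)) = ys := by
  simp [PySem.List.slice]

-- replacing a single char by "" is a filter
theorem replace_go_filter (c : Char) : ∀ (fuel : Nat) (l acc : List Char),
    l.length ≤ fuel →
    PySem.Chars.replace.go [c] [] fuel l acc = acc.reverse ++ l.filter (· ≠ c) := by
  intro fuel
  induction fuel with
  | zero =>
    intro l acc h
    have : l = [] := List.length_eq_zero_iff.mp (Nat.le_zero.mp h)
    subst this
    simp [PySem.Chars.replace.go]
  | succ fuel ih =>
    intro l acc h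
    cases l with
    | nil => simp [PySem.Chars.replace.go]
    | cons x t =>
      by_cases hx : x = c
      · subst hx
        have hstep : PySem.Chars.replace.go [x] [] (fuel + 1) (x :: t) acc =
            PySem.Chars.replace.go [x] [] fuel t acc := by
          rw [PySem.Chars.replace.go]
          simp [List.isPrefixOf]
        rw [hstep, ih t acc (by simp at h; omega)]
        simp
      · have hx' : ¬ (c = x) := fun hh => hx hh.symm
        have hstep : PySem.Chars.replace.go [c] [] (fuel + 1) (x :: t) acc =
            PySem.Chars.replace.go [c] [] fuel t (x :: acc) := by
          rw [PySem.Chars.replace.go]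
          simp [List.isPrefixOf, hx']
        rw [hstep, ih t (x :: acc) (by simp at h; omega)]
        simp [hx]

theorem replace_comma (cs : List Char) :
    PySem.Chars.replace cs [','] [] = cs.filter (· ≠ ',') := by
  rw [PySem.Chars.replace]
  simp only [List.isEmpty_cons, Bool.false_eq_true, if_false]
  exact replace_go_filter ',' cs.length cs [] le_rfl

theorem digitChar_ne_comma (m : Nat) : Nat.digitChar m ≠ ',' := by
  rcases Nat.lt_or_ge m 16 with h | h
  · interval_cases m <;> decide
  · have h0 : Nat.digitChar m = '*' := by
      unfold Nat.digitChar
      rw [if_neg (by omega), if_neg (by omega), if_neg (by omega), if_neg (by omega),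
          if_neg (by omega), if_neg (by omega), if_neg (by omega), if_neg (by omega),
          if_neg (by omega), if_neg (by omega), if_neg (by omega), if_neg (by omega),
          if_neg (by omega), if_neg (by omega), if_neg (by omega), if_neg (by omega)]
    rw [h0]; decide

theorem toDigitsCore_no_comma : ∀ (fuel n : Nat) (acc : List Char),
    (∀ c ∈ acc, c ≠ ',') → ∀ c ∈ Nat.toDigitsCore 10 fuel n acc, c ≠ ',' := by
  intro fuel
  induction fuel with
  | zero => intro n acc hacc; simpa [Nat.toDigitsCore] using hacc
  | succ fuel ih =>
    intro n acc hacc c hc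
    rw [Nat.toDigitsCore] at hc
    by_cases h : n / 10 = 0
    · simp only [h, if_true, List.mem_cons] at hc
      rcases hc with h1 | h2
      · rw [h1]; exact digitChar_ne_comma _
      · exact hacc c h2
    · simp only [h, if_false] at hc
      exact ih (n / 10) _ (by
        intro c' hc'
        rcases List.mem_cons.mp hc' with h1 | h2
        · rw [h1]; exact digitChar_ne_comma _
        · exact hacc c' h2) c hc

theorem toChars_no_comma (n : Int) : ∀ c ∈ PySem.Int.toChars n, c ≠ ',' := by
  unfold PySem.Int.toChars
  split_ifs with h
  · intro c hc
    rcases List.mem_cons.mp hc with h1 | h2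
    · rw [h1]; decide
    · exact toDigitsCore_no_comma _ _ [] (by simp) c h2
  · exact toDigitsCore_no_comma _ _ [] (by simp)

theorem join_filter_comma : ∀ (ls : List (List Char)),
    (∀ s ∈ ls, ∀ c ∈ s, c ≠ ',') →
    (PySem.Chars.join (", ".toList) ls).filter (· ≠ ',') = PySem.Chars.join (" ".toList) ls := by
  intro ls
  induction ls with
  | nil => intro _; simp [PySem.Chars.join, List.intercalate]
  | cons s rest ih =>
    intro h
    cases rest with
    | nil =>
      simp [PySem.Chars.join, List.intercalate]
      intro c hc
      exact h s (by simp) c hc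
    | cons s' rest' =>
      have h1 : PySem.Chars.join (", ".toList) (s :: s' :: rest') =
          s ++ (", ".toList ++ PySem.Chars.join (", ".toList) (s' :: rest')) := by
        rw [PySem.Chars.join_cons_cons, List.append_assoc]
      have h2 : PySem.Chars.join (" ".toList) (s :: s' :: rest') =
          s ++ (" ".toList ++ PySem.Chars.join (" ".toList) (s' :: rest')) := by
        rw [PySem.Chars.join_cons_cons, List.append_assoc]
      rw [h1, h2, List.filter_append, List.filter_append]
      rw [List.filter_eq_self.mpr (by intro c hc; simpa using h s (by simp) c hc)]
      rw [ih (by intro t ht c hc; exact h t (by simp [ht]) c hc)]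
      have hsep : List.filter (fun x => decide (x ≠ ',')) (", ".toList) = (" ".toList) := by decide
      rw [hsep]

theorem format_eq (ans : List Int) :
    PySem.Chars.replace
        (PySem.List.slice ('[' :: (PySem.Chars.join (", ".toList) (ans.map PySem.Int.toChars) ++ [']']))
          (some 1) (some (-1))) (",".toList) ("".toList)
      = PySem.Chars.join (" ".toList) (ans.map PySem.Int.toChars) := by
  rw [slice_brackets]
  have h1 : (",".toList : List Char) = [','] := by decide
  have h2 : ("".toList : List Char) = [] := by decide
  rw [h1, h2, replace_comma]
  exact join_filter_comma _ (by
    intro s hs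
    rcases List.mem_map.mp hs with ⟨n, _, rfl⟩
    exact toChars_no_comma n)

-- the two ports deliver the same discard sequence, hence the same string
theorem ans_eq (input_data : Int) :
    ((List.range (PySem.List.pyRange 1 (input_data + 1) 1).length).foldl
        (solutionStep input_data) ([], PySem.List.pyRange 1 (input_data + 1) 1)).1
      = loopB (PySem.List.pyRange 1 (input_data + 1) 1) [] true := by
  rw [loopB_eq_J]
  set dq := PySem.List.pyRange 1 (input_data + 1) 1 with hdq
  by_cases hn : 0 ≤ input_data
  · have hlen : (dq.length : Int) = input_data := by
      rw [hdq]; simp [pysem]; omega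
    rw [foldA input_data dq.length dq [] (List.range dq.length) rfl (by simp) (by simpa using hlen)]
    simp
  · have hdqnil : dq = [] := by
      rw [hdq]
      have : (PySem.List.pyRange 1 (input_data + 1) 1).length = 0 := by
        simp [pysem]; omega
      exact List.length_eq_zero_iff.mp this
    rw [hdqnil]
    simp [J]

-- ===== VERDICT (by name: the statement is the Claim_ definition above) =====
theorem solution_spec : Claim_equal_solution := by
  intro input_data _
  unfold Spec_solution solution solution_alt
  dsimp only
  rw [ans_eq, format_eq]
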